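-- pv_equiv track=rewrite | github.com/ElyesT0/replayseq | 1-Scripts/analysis_scripts/modules/replay_functions/epoching_funcs.py | extract_first_occurrences
-- ===== SOURCE A (Python) =====
-- def extract_first_occurrences(lst):
--     first_occurrences = {}
--     seen = set()
--
--     for index, value in enumerate(lst):
--         if value not in seen:
--             seen.add(value)
--             first_occurrences[index] = value
--
--     return first_occurrences
-- ===== SOURCE B (Python) =====
-- def extract_first_occurrences(lst):
--     return {lst.index(v): v for v in dict.fromkeys(lst)}
-- ===== Notes on version B (the rewrite author's own statement) =====
-- stated objective: idiomatic
-- what changed: Replaces the single pass with a seen-set and a dict keyed by index by a dict comprehension over dict.fromkeys(lst) (distinct values in first-occurrence order), recovering each key with lst.index(v).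
import Mathlib
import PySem

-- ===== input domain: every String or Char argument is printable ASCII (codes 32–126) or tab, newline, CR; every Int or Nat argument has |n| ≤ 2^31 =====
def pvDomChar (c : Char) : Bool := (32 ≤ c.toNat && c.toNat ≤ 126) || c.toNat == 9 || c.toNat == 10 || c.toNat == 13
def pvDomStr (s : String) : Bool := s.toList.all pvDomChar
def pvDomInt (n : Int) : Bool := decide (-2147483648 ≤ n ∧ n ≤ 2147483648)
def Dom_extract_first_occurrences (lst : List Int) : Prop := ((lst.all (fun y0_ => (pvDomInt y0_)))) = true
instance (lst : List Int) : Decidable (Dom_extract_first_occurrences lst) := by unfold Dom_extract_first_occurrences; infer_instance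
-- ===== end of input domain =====

-- B rebuilds the dict from dict.fromkeys(lst) + lst.index instead of A's one pass with a seen set;
-- objective: idiomatic. Both are total; return values proved equal on all inputs.

-- ===== PORT A =====
-- the loop over enumerate(lst) with state (first_occurrences, seen)
def pvGoA : List (Int × Int) → PySem.Dict Int Int × PySem.Set Int → PySem.Dict Int Int × PySem.Set Int
  | [], st => st
  | (i, v) :: rest, (d, seen) =>
    if PySem.Set.contains seen v then pvGoA rest (d, seen)
    else pvGoA rest (d.insert i v, PySem.Set.add seen v)

def extract_first_occurrences (lst : List Int) : List (Int × Int) :=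
  (pvGoA (PySem.List.enumerate lst 0) (PySem.Dict.empty, PySem.Set.empty)).1.items

-- ===== PORT B =====
-- {lst.index(v): v for v in dict.fromkeys(lst)}; every v is an element of lst,
-- so .index never raises and the getD 0 default is unreachable
def extract_first_occurrences_alt (lst : List Int) : List (Int × Int) :=
  (PySem.List.dedup lst).map (fun v => ((((PySem.List.index? lst v).getD 0 : Nat) : Int), v))

-- ===== PRECONDITION & SPEC =====
def Spec_extract_first_occurrences (lst : List Int) (out : List (Int × Int)) : Prop := out = extract_first_occurrences_alt lst
instance (lst : List Int) (out : List (Int × Int)) : Decidable (Spec_extract_first_occurrences lst out) := by unfold Spec_extract_first_occurrences; infer_instance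

-- ===== CLAIM (what is proved, stated in full; the proofs are below) =====
def Claim_equal_extract_first_occurrences : Prop := ∀ (lst : List Int), Dom_extract_first_occurrences lst → Spec_extract_first_occurrences lst (extract_first_occurrences lst)

-- ===== LEMMAS AND PROOFS =====

-- first index of v in l (meaningful when v ∈ l)
def pvIdx : List Int → Int → Nat
  | [], _ => 0
  | x :: xs, v => if x = v then 0 else pvIdx xs v + 1

-- the values A's loop adds from here on: first occurrences not already in seen
def pvNew : PySem.Set Int → List Int → List Int
  | _, [] => []
  | seen, x :: xs => if PySem.Set.contains seen x then pvNew seen xs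
                     else x :: pvNew (PySem.Set.add seen x) xs

theorem pvNew_cons_mem (seen : PySem.Set Int) (x : Int) (xs : List Int) (hc : x ∈ seen) :
    pvNew seen (x :: xs) = pvNew seen xs := by
  rw [pvNew, if_pos]; simpa [PySem.Set.contains] using hc

theorem pvNew_cons_not_mem (seen : PySem.Set Int) (x : Int) (xs : List Int) (hc : ¬ x ∈ seen) :
    pvNew seen (x :: xs) = x :: pvNew (PySem.Set.add seen x) xs := by
  rw [pvNew, if_neg]; simpa [PySem.Set.contains] using hc

theorem pvGoA_cons_mem (i x : Int) (rest : List (Int × Int)) (d : PySem.Dict Int Int)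
    (seen : PySem.Set Int) (hc : x ∈ seen) :
    pvGoA ((i, x) :: rest) (d, seen) = pvGoA rest (d, seen) := by
  rw [pvGoA, if_pos]; simpa [PySem.Set.contains] using hc

theorem pvGoA_cons_not_mem (i x : Int) (rest : List (Int × Int)) (d : PySem.Dict Int Int)
    (seen : PySem.Set Int) (hc : ¬ x ∈ seen) :
    pvGoA ((i, x) :: rest) (d, seen) = pvGoA rest (d.insert i x, PySem.Set.add seen x) := by
  rw [pvGoA, if_neg]; simpa [PySem.Set.contains] using hc

theorem pvAdd_mem (s : PySem.Set Int) (x : Int) (hc : x ∈ s) : PySem.Set.add s x = s := by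
  rw [PySem.Set.add, if_pos]; simpa [PySem.Set.contains] using hc

theorem pvAdd_not_mem (s : PySem.Set Int) (x : Int) (hc : ¬ x ∈ s) :
    PySem.Set.add s x = s ++ [x] := by
  rw [PySem.Set.add, if_neg]; simpa [PySem.Set.contains] using hc

theorem pvNew_not_mem (l : List Int) (seen : PySem.Set Int) (v : Int)
    (hv : v ∈ pvNew seen l) : v ∉ seen := by
  induction l generalizing seen with
  | nil => simp [pvNew] at hv
  | cons x xs ih =>
    by_cases hc : x ∈ seen
    · exact ih seen (by rwa [pvNew_cons_mem seen x xs hc] at hv)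
    · rw [pvNew_cons_not_mem seen x xs hc] at hv
      rcases List.mem_cons.mp hv with rfl | hv
      · exact hc
      · have h2 := ih (PySem.Set.add seen x) hv
        intro hs
        exact h2 ((PySem.Set.mem_add seen x v).mpr (Or.inl hs))

theorem pvGoA_items (xs : List Int) (i : Int) (d : PySem.Dict Int Int) (seen : PySem.Set Int)
    (hk : ∀ k ∈ d.keys, k < i) :
    (pvGoA (PySem.List.enumerate xs i) (d, seen)).1.items
      = d.items ++ (pvNew seen xs).map (fun v => (i + (pvIdx xs v : Int), v)) := by
  induction xs generalizing i d seen with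
  | nil => simp [PySem.List.enumerate_nil, pvGoA, pvNew]
  | cons x xs ih =>
    rw [PySem.List.enumerate_cons]
    by_cases hc : x ∈ seen
    · rw [pvGoA_cons_mem i x _ d seen hc,
        ih (i + 1) d seen (fun k h => lt_trans (hk k h) (by omega)),
        pvNew_cons_mem seen x xs hc]
      congr 1
      refine List.map_congr_left ?_
      intro v hv
      have hne : x ≠ v := fun h => pvNew_not_mem xs seen v hv (h ▸ hc)
      simp only [pvIdx, hne, ite_false]
      push_cast
      ring_nf
    · have hdk : d.contains i = false := by
        cases h : d.contains i with
        | false => rfl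
        | true => exact absurd (hk i ((PySem.Dict.contains_iff_mem_keys d i).mp h)) (lt_irrefl i)
      have hkeys : ∀ k ∈ (d.insert i x).keys, k < i + 1 := by
        intro k hkm
        rcases (PySem.Dict.mem_keys_insert d i k x).mp hkm with rfl | hkm
        · omega
        · exact lt_trans (hk k hkm) (by omega)
      rw [pvGoA_cons_not_mem i x _ d seen hc, ih (i + 1) _ _ hkeys,
        PySem.Dict.items_insert_of_not_contains d x hdk,
        pvNew_cons_not_mem seen x xs hc]
      simp only [List.map_cons, List.append_assoc, List.cons_append, List.nil_append]
      congr 1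
      congr 1
      · simp [pvIdx]
      · refine List.map_congr_left ?_
        intro v hv
        have hvn := pvNew_not_mem xs (PySem.Set.add seen x) v hv
        have hne : x ≠ v := fun h =>
          hvn ((PySem.Set.mem_add seen x v).mpr (Or.inr h.symm))
        simp only [pvIdx, hne, ite_false]
        push_cast
        ring_nf

theorem pvFoldl_add (l : List Int) (s : PySem.Set Int) :
    l.foldl PySem.Set.add s = s ++ pvNew s l := by
  induction l generalizing s with
  | nil => simp [pvNew]
  | cons x xs ih =>
    by_cases hc : x ∈ s
    · rw [List.foldl_cons, pvAdd_mem s x hc, ih, pvNew_cons_mem s x xs hc]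
    · rw [List.foldl_cons, pvAdd_not_mem s x hc, ih, pvNew_cons_not_mem s x xs hc]
      simp [pvAdd_not_mem s x hc]

theorem pvNew_empty (l : List Int) : pvNew PySem.Set.empty l = PySem.List.dedup l := by
  have h := pvFoldl_add l PySem.Set.empty
  rw [PySem.List.dedup_eq_ofList, PySem.Set.ofList_eq_foldl]
  simpa [PySem.Set.empty] using h.symm

theorem pvIdx_index? (l : List Int) (v : Int) (hv : v ∈ l) :
    PySem.List.index? l v = some (pvIdx l v) := by
  induction l with
  | nil => simp at hv
  | cons x xs ih =>
    by_cases hx : x = v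
    · subst hx; rw [PySem.List.index?_cons_self, pvIdx]; simp
    · have hv' : v ∈ xs := by
        rcases List.mem_cons.mp hv with rfl | h
        · exact absurd rfl hx
        · exact h
      rw [PySem.List.index?_cons_of_ne xs hx, ih hv']
      simp [pvIdx, hx]

-- ===== VERDICT (by name: the statement is the Claim_ definition above) =====
theorem extract_first_occurrences_spec : Claim_equal_extract_first_occurrences := by
  intro lst _
  show _ = _
  rw [extract_first_occurrences, extract_first_occurrences_alt,
    pvGoA_items lst 0 PySem.Dict.empty PySem.Set.empty (by simp [PySem.Dict.keys_empty]),
    pvNew_empty]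
  simp only [PySem.Dict.empty, List.nil_append]
  refine List.map_congr_left ?_
  intro v hv
  rw [pvIdx_index? lst v ((PySem.List.mem_dedup lst v).mp hv)]
  simp
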